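-- pv_equiv track=rewrite | github.com/luminousflux/overdiff | overdiff/overdiff.py | find_splits
-- ===== SOURCE A (Python) =====
-- def find_splits(haystack, token, start, end):
--     """Find occurences of tokens in haystack between start and end and return their indices
--
--        >>> find_splits('asdf geh', ' ', 0, 7)
--        [4]
--        >>> find_splits('asdf geh', ' ', 5, 7)
--        []
--     """
--     splits = []
--     x = start-1
--     while True:
--         x = haystack.find(token, x+1)
--         if x>=0 and x<=end:
--             splits.append(x)
--         else:
--             break
--     return splits
-- ===== SOURCE B (Python) =====
-- def find_splits(haystack, token, start, end):
--     # Scan every position once instead of chained str.find calls; a negative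
--     # start is normalised the way str.find interprets it (counted from the end).
--     lo = start if start >= 0 else len(haystack) + start
--     return [i for i in range(len(haystack) + 1)
--             if lo <= i <= end and haystack.startswith(token, i)]
-- ===== Notes on version B (the rewrite author's own statement) =====
-- stated objective: alternative
-- what changed: B replaces A's chained str.find while-loop (with its break-on-first-miss control flow) by a single comprehension that scans every position 0..len once and keeps the positions where the token matches and that lie in the normalised [start, end] window.
import Mathlib
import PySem

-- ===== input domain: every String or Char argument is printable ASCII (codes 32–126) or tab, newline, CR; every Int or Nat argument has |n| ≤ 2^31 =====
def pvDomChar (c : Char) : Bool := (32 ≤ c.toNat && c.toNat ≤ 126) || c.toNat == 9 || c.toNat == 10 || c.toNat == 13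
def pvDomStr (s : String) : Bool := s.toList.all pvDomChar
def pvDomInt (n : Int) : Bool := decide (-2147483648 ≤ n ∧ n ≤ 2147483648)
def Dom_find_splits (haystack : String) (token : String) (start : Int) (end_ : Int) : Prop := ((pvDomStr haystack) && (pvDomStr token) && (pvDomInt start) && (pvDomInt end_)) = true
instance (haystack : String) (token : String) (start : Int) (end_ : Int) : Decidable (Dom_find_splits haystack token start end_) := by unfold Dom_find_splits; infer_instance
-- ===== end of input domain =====

-- ===== PORT A =====
-- B differs from A only in structure (one scan over all positions instead of chained find calls);
-- the return values are proved equal on the whole domain.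
-- Loop of A: fuel is a port artifact; haystack.length + 2 iterations always suffice because each
-- successful find result is a strictly increasing index ≤ length (proved in the lemmas below).
def findSplitsLoop (h t : List Char) (end_ : Int) : Nat → Int → List Int → List Int
  | 0, _, acc => acc
  | fuel+1, x, acc =>
    let x' := PySem.Chars.findFrom h t (x+1) none
    if 0 ≤ x' ∧ x' ≤ end_ then findSplitsLoop h t end_ fuel x' (acc ++ [x'])
    else acc

def find_splits (haystack : String) (token : String) (start : Int) (end_ : Int) : List Int :=
  findSplitsLoop haystack.toList token.toList end_ (haystack.toList.length + 2) (start - 1) []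

-- ===== PORT B =====
-- haystack.startswith(token, i) for 0 ≤ i ≤ len(haystack) is exactly: token is a prefix of haystack[i:].
def find_splits_alt (haystack : String) (token : String) (start : Int) (end_ : Int) : List Int :=
  let h := haystack.toList
  let t := token.toList
  let lo : Int := if 0 ≤ start then start else (h.length : Int) + start
  ((List.range (h.length + 1)).filter
      (fun (i : Nat) => decide (lo ≤ (i : Int)) && decide ((i : Int) ≤ end_) && t.isPrefixOf (h.drop i))).map
    (fun i => (i : Int))

-- ===== PRECONDITION & SPEC =====
def Spec_find_splits (haystack : String) (token : String) (start : Int) (end_ : Int) (out : List Int) : Prop := out = find_splits_alt haystack token start end_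
instance (haystack : String) (token : String) (start : Int) (end_ : Int) (out : List Int) : Decidable (Spec_find_splits haystack token start end_ out) := by unfold Spec_find_splits; infer_instance

-- ===== CLAIM (what is proved, stated in full; the proofs are below) =====
def Claim_equal_find_splits : Prop := ∀ (haystack : String) (token : String) (start : Int) (end_ : Int), Dom_find_splits haystack token start end_ → Spec_find_splits haystack token start end_ (find_splits haystack token start end_)

-- ===== LEMMAS AND PROOFS =====

-- findFrom with a negative start index clamps it the way Python slice bounds do.
lemma findFrom_of_neg (s t : List Char) (k : Int) (hk : k < 0) :
    PySem.Chars.findFrom s t k none = PySem.Chars.findFrom s t (max 0 ((s.length : Int) + k)) none := by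
  simp only [PySem.Chars.findFrom]
  have h1 : ¬ (max 0 ((s.length : Int) + k) < 0) := by omega
  rw [if_pos hk, if_neg h1]
  have h2 : (if k + (s.length : Int) < 0 then 0 else k + (s.length : Int))
      = max 0 ((s.length : Int) + k) := by split_ifs <;> omega
  rw [h2]

-- findFrom with a start index past the length returns -1.
lemma findFrom_of_gt_length (s t : List Char) (k : Int) (hk : (s.length : Int) < k) :
    PySem.Chars.findFrom s t k none = -1 := by
  simp only [PySem.Chars.findFrom]
  have h0 : ¬ (k < 0) := by omega
  simp [h0, hk]

lemma infix_drop_of_prefix_drop {h t : List Char} {n i : Nat} (hni : n ≤ i)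
    (hp : t <+: h.drop i) : t <:+: h.drop n := by
  obtain ⟨r, hr⟩ := hp
  refine ⟨(h.drop n).take (i - n), r, ?_⟩
  have : h.drop i = (h.drop n).drop (i - n) := by
    rw [List.drop_drop]; congr 1; omega
  rw [this] at hr
  calc (h.drop n).take (i - n) ++ t ++ r
      = (h.drop n).take (i - n) ++ (t ++ r) := by rw [List.append_assoc]
    _ = (h.drop n).take (i - n) ++ (h.drop n).drop (i - n) := by rw [hr]
    _ = h.drop n := List.take_append_drop _ _

lemma filter_range_eq_cons (m j : Nat) (p q : Nat → Bool) (hjm : j < m) (hpj : p j = true)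
    (hlow : ∀ i, i < j → p i = false) (hq : ∀ i, j < i → q i = p i)
    (hqlow : ∀ i, i ≤ j → q i = false) :
    (List.range m).filter p = j :: (List.range m).filter q := by
  have hm : m = (j + 1) + (m - (j + 1)) := by omega
  rw [hm, List.range_add, List.filter_append, List.filter_append, List.range_succ,
    List.filter_append, List.filter_append]
  have h1 : (List.range j).filter p = [] :=
    List.filter_eq_nil_iff.2 (fun a ha => by simp [hlow a (List.mem_range.1 ha)])
  have h1' : (List.range j).filter q = [] :=
    List.filter_eq_nil_iff.2 (fun a ha => by
      simp [hqlow a (Nat.le_of_lt (List.mem_range.1 ha))])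
  have h2 : [j].filter p = [j] := by simp [hpj]
  have h2' : [j].filter q = ([] : List Nat) := by simp [hqlow j le_rfl]
  have h3 : ((List.range (m - (j + 1))).map (fun x => (j + 1) + x)).filter p
      = ((List.range (m - (j + 1))).map (fun x => (j + 1) + x)).filter q := by
    refine List.filter_congr ?_
    intro a ha
    obtain ⟨x, _, rfl⟩ := List.mem_map.1 ha
    exact (hq _ (by omega)).symm
  rw [h1, h1', h2, h2', h3]
  simp

-- main loop invariant: from search position n, A's loop appends exactly the
-- match positions i with n ≤ i ≤ end_, in increasing order.
lemma loop_eq (h t : List Char) (end_ : Int) :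
    ∀ (fuel n : Nat) (acc : List Int), h.length + 2 - n ≤ fuel → 0 < fuel →
    findSplitsLoop h t end_ fuel ((n : Int) - 1) acc =
      acc ++ ((List.range (h.length + 1)).filter
        (fun (i : Nat) => decide ((n : Int) ≤ (i : Int)) && decide ((i : Int) ≤ end_)
          && t.isPrefixOf (h.drop i))).map (fun i => (i : Int)) := by
  intro fuel
  induction fuel with
  | zero => intro n acc hf hf0; omega
  | succ fuel ih =>
    intro n acc hf _
    have hx1 : ((n : Int) - 1) + 1 = (n : Int) := by ring
    rw [findSplitsLoop, hx1]
    by_cases hn : h.length < n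
    · -- search start past the string: find returns -1, both sides add nothing
      rw [findFrom_of_gt_length h t _ (by exact_mod_cast hn)]
      have hfil : (List.range (h.length + 1)).filter
          (fun (i : Nat) => decide ((n : Int) ≤ (i : Int)) && decide ((i : Int) ≤ end_)
            && t.isPrefixOf (h.drop i)) = [] := by
        refine List.filter_eq_nil_iff.2 (fun a ha => ?_)
        have hal := List.mem_range.1 ha
        intro hcon
        simp only [Bool.and_eq_true, decide_eq_true_eq] at hcon
        have : (n : Int) ≤ (a : Int) := hcon.1.1
        omega
      rw [hfil]
      norm_num
    · have hnlen : n ≤ h.length := by omega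
      by_cases ht : t <:+: h.drop n
      · have hne : PySem.Chars.findFrom h t (n : Int) none ≠ -1 := by
          rw [ne_eq, PySem.Chars.findFrom_natCast_eq_neg_one_iff h t n hnlen]
          simpa using ht
        obtain ⟨hge, hpre, hmin⟩ := PySem.Chars.findFrom_natCast_spec h t n hnlen hne
        set x' := PySem.Chars.findFrom h t (n : Int) none with hx'
        have hx0 : (0 : Int) ≤ x' := le_trans (by exact_mod_cast Nat.zero_le n) hge
        have hxlen : x' ≤ (h.length : Int) := by
          rw [hx', PySem.Chars.findFrom_natCast h t n hnlen]
          have hfind := PySem.Chars.find_le_length (h.drop n) t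
          rw [List.length_drop] at hfind
          split_ifs with hneg
          · omega
          · omega
        set j := x'.toNat with hj
        have hjx : (j : Int) = x' := Int.toNat_of_nonneg hx0
        have hjlen : j ≤ h.length := by omega
        have hnj : n ≤ j := by omega
        by_cases hend : x' ≤ end_
        · rw [if_pos ⟨hx0, hend⟩]
          have hstep : x' = ((j + 1 : Nat) : Int) - 1 := by push_cast; omega
          have hrec := ih (j + 1) (acc ++ [x']) (by omega) (by omega)
          rw [← hstep] at hrec
          rw [hrec]
          have hsplit : (List.range (h.length + 1)).filter
              (fun (i : Nat) => decide ((n : Int) ≤ (i : Int)) && decide ((i : Int) ≤ end_)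
                && t.isPrefixOf (h.drop i))
              = j :: (List.range (h.length + 1)).filter
              (fun (i : Nat) => decide (((j + 1 : Nat) : Int) ≤ (i : Int)) && decide ((i : Int) ≤ end_)
                && t.isPrefixOf (h.drop i)) := by
            refine filter_range_eq_cons _ _ _ _ (by omega) ?_ ?_ ?_ ?_
            · simp only [Bool.and_eq_true, decide_eq_true_eq]
              refine ⟨⟨by exact_mod_cast hnj, by rw [hjx]; exact hend⟩, ?_⟩
              exact List.isPrefixOf_iff_prefix.2 hpre
            · intro i hij
              by_cases hni : n ≤ i
              · have hpf : t.isPrefixOf (h.drop i) = false := by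
                  rw [Bool.eq_false_iff]
                  exact fun hc => hmin i hni hij (List.isPrefixOf_iff_prefix.1 hc)
                simp [hpf]
              · have hni' : ¬ ((n : Int) ≤ (i : Int)) := fun hc => hni (by exact_mod_cast hc)
                simp [hni']
            · intro i hji
              have h1 : ((j + 1 : Nat) : Int) ≤ (i : Int) := by exact_mod_cast hji
              have h2 : (n : Int) ≤ (i : Int) := by exact_mod_cast (by omega : n ≤ i)
              simp [h2, hji]
            · intro i hij
              have hji : ¬ j < i := by omega
              simp [hji]
          rw [hsplit]
          simp [hjx]
        · rw [if_neg (by tauto)]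
          have hfil : (List.range (h.length + 1)).filter
              (fun (i : Nat) => decide ((n : Int) ≤ (i : Int)) && decide ((i : Int) ≤ end_)
                && t.isPrefixOf (h.drop i)) = [] := by
            refine List.filter_eq_nil_iff.2 (fun a ha => ?_)
            intro hcon
            simp only [Bool.and_eq_true, decide_eq_true_eq] at hcon
            obtain ⟨⟨hna, hae⟩, hap⟩ := hcon
            have hap' : t <+: h.drop a := List.isPrefixOf_iff_prefix.1 hap
            have hna' : n ≤ a := by exact_mod_cast hna
            by_cases haj : a < j
            · exact hmin a hna' haj hap'
            · have : x' ≤ (a : Int) := by omega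
              omega
          rw [hfil]
          norm_num
      · -- no occurrence from position n on: find returns -1, filter is empty
        have heq : PySem.Chars.findFrom h t (n : Int) none = -1 :=
          (PySem.Chars.findFrom_natCast_eq_neg_one_iff h t n hnlen).2 ht
        rw [heq]
        have hfil : (List.range (h.length + 1)).filter
            (fun (i : Nat) => decide ((n : Int) ≤ (i : Int)) && decide ((i : Int) ≤ end_)
              && t.isPrefixOf (h.drop i)) = [] := by
          refine List.filter_eq_nil_iff.2 (fun a ha => ?_)
          intro hcon
          simp only [Bool.and_eq_true, decide_eq_true_eq] at hcon
          obtain ⟨⟨hna, _⟩, hap⟩ := hcon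
          exact ht (infix_drop_of_prefix_drop (show n ≤ a by exact_mod_cast hna)
            (List.isPrefixOf_iff_prefix.1 hap))
        rw [hfil]
        norm_num

-- the first loop step only reads x through findFrom h t (x+1)
lemma loop_step_congr (h t : List Char) (end_ : Int) (fuel : Nat) (x y : Int) (acc : List Int)
    (hxy : PySem.Chars.findFrom h t (x + 1) none = PySem.Chars.findFrom h t (y + 1) none) :
    findSplitsLoop h t end_ (fuel + 1) x acc = findSplitsLoop h t end_ (fuel + 1) y acc := by
  rw [findSplitsLoop, findSplitsLoop, hxy]

-- ===== VERDICT (by name: the statement is the Claim_ definition above) =====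
theorem find_splits_spec : Claim_equal_find_splits := by
  intro haystack token start end_ _
  unfold Spec_find_splits find_splits find_splits_alt
  set h := haystack.toList with hh
  set t := token.toList with htl
  by_cases hs : 0 ≤ start
  · -- start ≥ 0: lo = start
    have hst : start - 1 = ((start.toNat : Int)) - 1 := by omega
    rw [hst, loop_eq h t end_ (h.length + 2) start.toNat [] (by omega) (by omega)]
    simp only [List.nil_append, if_pos hs]
    have hfil : (List.range (h.length + 1)).filter
        (fun (i : Nat) => decide (((start.toNat : Int)) ≤ (i : Int)) && decide ((i : Int) ≤ end_)
          && t.isPrefixOf (h.drop i))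
        = (List.range (h.length + 1)).filter
        (fun (i : Nat) => decide (start ≤ (i : Int)) && decide ((i : Int) ≤ end_)
          && t.isPrefixOf (h.drop i)) := by
      refine List.filter_congr ?_
      intro i _
      rw [Int.toNat_of_nonneg hs]
    rw [hfil]
  · -- start < 0: find clamps start to max 0 (len + start); on i ≥ 0 the window test
    -- lo ≤ i with lo = len + start selects the same positions
    have hs' : start < 0 := by omega
    set m : Nat := ((h.length : Int) + start).toNat with hm
    have hmi : ((m : Int)) = max 0 ((h.length : Int) + start) := by rw [hm]; omega
    have hclamp : PySem.Chars.findFrom h t ((start - 1) + 1) none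
        = PySem.Chars.findFrom h t (((m : Int) - 1) + 1) none := by
      have e1 : (start - 1) + 1 = start := by ring
      have e2 : ((m : Int) - 1) + 1 = (m : Int) := by ring
      rw [e1, e2, findFrom_of_neg h t start hs', hmi]
    rw [show h.length + 2 = (h.length + 1) + 1 from rfl,
      loop_step_congr h t end_ (h.length + 1) _ _ [] hclamp,
      ← show h.length + 2 = (h.length + 1) + 1 from rfl,
      loop_eq h t end_ (h.length + 2) m [] (by omega) (by omega)]
    simp only [List.nil_append, if_neg hs]
    have hfil : (List.range (h.length + 1)).filter
        (fun (i : Nat) => decide (((m : Int)) ≤ (i : Int)) && decide ((i : Int) ≤ end_)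
          && t.isPrefixOf (h.drop i))
        = (List.range (h.length + 1)).filter
        (fun (i : Nat) => decide ((h.length : Int) + start ≤ (i : Int)) && decide ((i : Int) ≤ end_)
          && t.isPrefixOf (h.drop i)) := by
      refine List.filter_congr ?_
      intro i _
      have : (((m : Int)) ≤ (i : Int)) ↔ ((h.length : Int) + start ≤ (i : Int)) := by
        rw [hmi]; omega
      simp only [decide_eq_decide.2 this]
    rw [hfil]
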